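-- pv_equiv track=rewrite | github.com/K1521/geometricalgebra1 | inverttest2.py | inv4
-- ===== SOURCE A (Python) =====
-- def inv4(bas1,bas2):
--     bas1acc=bas1^(bas1.bit_count()&1)
--     i=1
--     l=min(bas1.bit_length(),bas2.bit_length())
--     mask=(2<<l)-1
--     while i<=l:
--         bas1acc^=(bas1acc<<i)&mask
--         i<<=1
--     return (bas1acc&bas2).bit_count()&1
-- ===== SOURCE B (Python) =====
-- def inv4(bas1, bas2):
--     t = bas1.bit_count() & 1
--     l = min(bas1.bit_length(), bas2.bit_length())
--     w = l + 1
--     pf = 0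
--     low = 0
--     for j in range(w):
--         pf ^= (bas1 >> j) & 1
--         low += (pf ^ t) << j
--     acc = ((bas1 >> w) << w) + low
--     return (acc & bas2).bit_count() & 1
-- ===== Notes on version B (the rewrite author's own statement) =====
-- stated objective: alternative
-- what changed: A xor-folds the accumulator into itself with doubling masked left-shifts (a log-stepped prefix-xor network); B makes one direct linear pass over the bit positions 0..l carrying a running prefix parity, builds the low window additively bit by bit, and reattaches the untouched high bits before the final AND/popcount.
import Mathlib
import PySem

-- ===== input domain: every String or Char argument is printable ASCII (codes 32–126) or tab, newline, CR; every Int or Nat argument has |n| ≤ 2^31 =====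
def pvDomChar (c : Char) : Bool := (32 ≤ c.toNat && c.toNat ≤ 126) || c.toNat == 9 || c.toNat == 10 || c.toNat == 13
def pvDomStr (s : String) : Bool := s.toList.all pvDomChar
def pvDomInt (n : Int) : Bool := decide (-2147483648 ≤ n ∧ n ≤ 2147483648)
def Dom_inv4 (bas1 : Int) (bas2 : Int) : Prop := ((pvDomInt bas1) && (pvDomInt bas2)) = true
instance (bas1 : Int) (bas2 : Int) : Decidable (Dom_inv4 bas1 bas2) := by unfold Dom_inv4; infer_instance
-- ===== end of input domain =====

-- B replaces A's doubling scan of masked left-shifts by a direct linear scan over the bit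
-- positions, maintaining a running prefix parity (objective: alternative algorithm, same result).

-- ===== PORT A =====
-- the while loop `while i<=l: bas1acc^=(bas1acc<<i)&mask; i<<=1`; i ≥ 1 doubles each pass,
-- so the loop runs at most l+1 times — the fuel l+1 only makes the recursion structural.
def inv4Loop : Nat → Nat → Int → Nat → Int → Int
  | 0, _, _, _, acc => acc
  | fuel+1, l, mask, i, acc =>
      if i ≤ l then
        inv4Loop fuel l mask (i <<< 1) (PySem.Int.bxor acc (PySem.Int.band (acc <<< i) mask))
      else acc

def inv4 (bas1 : Int) (bas2 : Int) : Int :=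
  let bas1acc := PySem.Int.bxor bas1 (PySem.Int.band ((PySem.Int.bitCount bas1 : Nat) : Int) 1)
  let l := min (PySem.Int.bitLength bas1) (PySem.Int.bitLength bas2)
  let mask := (2 : Int) <<< l - 1
  let acc := inv4Loop (l+1) l mask 1 bas1acc
  PySem.Int.band ((PySem.Int.bitCount (PySem.Int.band acc bas2) : Nat) : Int) 1

-- ===== PORT B =====
-- one step of B's for-loop over j: `pf ^= (bas1>>j)&1; low += (pf^t)<<j`
def inv4AltStep (bas1 t : Int) (s : Int × Int) (j : Nat) : Int × Int :=
  let pf := PySem.Int.bxor s.1 (PySem.Int.band (bas1 >>> j) 1)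
  (pf, s.2 + (PySem.Int.bxor pf t) <<< j)

def inv4_alt (bas1 : Int) (bas2 : Int) : Int :=
  let t := PySem.Int.band ((PySem.Int.bitCount bas1 : Nat) : Int) 1
  let l := min (PySem.Int.bitLength bas1) (PySem.Int.bitLength bas2)
  let w := l + 1
  let s := (List.range w).foldl (inv4AltStep bas1 t) (0, 0)
  let acc := ((bas1 >>> w) <<< w) + s.2
  PySem.Int.band ((PySem.Int.bitCount (PySem.Int.band acc bas2) : Nat) : Int) 1

-- ===== PRECONDITION & SPEC =====
def Spec_inv4 (bas1 : Int) (bas2 : Int) (out : Int) : Prop := out = inv4_alt bas1 bas2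
instance (bas1 : Int) (bas2 : Int) (out : Int) : Decidable (Spec_inv4 bas1 bas2 out) := by unfold Spec_inv4; infer_instance

-- ===== CLAIM (what is proved, stated in full; the proofs are below) =====
def Claim_equal_inv4 : Prop := ∀ (bas1 : Int) (bas2 : Int), Dom_inv4 bas1 bas2 → Spec_inv4 bas1 bas2 (inv4 bas1 bas2)

-- ===== LEMMAS AND PROOFS =====

-- Nat-level mirror of A's loop acting on the low (l+1)-bit window only
def natLoop : Nat → Nat → Nat → Nat → Nat
  | 0, _, _, x => x
  | fuel+1, l, i, x =>
      if i ≤ l then natLoop fuel l (i <<< 1) (x ^^^ ((x <<< i) % 2^(l+1))) else x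

-- parity of bits 0..j of x
def pref (x : Nat) : Nat → Bool
  | 0 => x.testBit 0
  | j+1 => Bool.xor (pref x j) (x.testBit (j+1))

theorem nat_xor_split (m v w : Nat) (hv : v < 2^w) :
    m ^^^ v = 2^w * (m / 2^w) + ((m % 2^w) ^^^ v) := by
  apply Nat.eq_of_testBit_eq
  intro j
  rw [Nat.testBit_two_pow_mul_add _ (Nat.xor_lt_two_pow (Nat.mod_lt _ (Nat.two_pow_pos w)) hv)]
  by_cases hj : j < w
  · simp [hj, Nat.testBit_xor, Nat.testBit_mod_two_pow]
  · have hvj : v < 2^j := lt_of_lt_of_le hv (Nat.pow_le_pow_right (by norm_num) (Nat.le_of_not_lt hj))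
    simp [hj, Nat.testBit_xor, Nat.testBit_div_two_pow, Nat.testBit_lt_two_pow hvj,
      Nat.sub_add_cancel (Nat.le_of_not_lt hj)]

theorem nat_xor_ones (w x : Nat) (hx : x < 2^w) : (2^w - 1) ^^^ x = 2^w - 1 - x := by
  apply Nat.eq_of_testBit_eq
  intro j
  have h1 : 2^w - 1 - x = 2^w - (x+1) := by omega
  rw [Nat.testBit_xor, Nat.testBit_two_pow_sub_one, h1, Nat.testBit_two_pow_sub_succ hx]
  by_cases hj : j < w
  · simp [hj]
  · have hxj : x < 2^j := lt_of_lt_of_le hx (Nat.pow_le_pow_right (by norm_num) (Nat.le_of_not_lt hj))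
    simp [hj, Nat.testBit_lt_two_pow hxj]

theorem cast_two_pow_sub (w r : Nat) (hr : r < 2^w) :
    ((2^w - 1 - r : Nat) : Int) = (2:Int)^w - 1 - (r:Int) := by
  have h : ((2^w : Nat) : Int) = (2:Int)^w := by push_cast; ring
  omega

theorem emod_neg_two_pow (m w : Nat) :
    ((-(m:Int) - 1) % (2:Int)^w) = ((2^w - 1 - m % 2^w : Nat) : Int) := by
  have hr : m % 2^w < 2^w := Nat.mod_lt _ (Nat.two_pow_pos w)
  have hm : (m : Int) = (2:Int)^w * (m / 2^w : Nat) + (m % 2^w : Nat) := by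
    conv_lhs => rw [← Nat.div_add_mod m (2^w)]
    push_cast; ring
  have key : -(m:Int) - 1
      = ((2^w - 1 - m % 2^w : Nat) : Int) + (2:Int)^w * (-((m / 2^w : Nat) : Int) - 1) := by
    rw [cast_two_pow_sub _ _ hr, hm]; ring
  rw [key, Int.add_mul_emod_self_left]
  apply Int.emod_eq_of_lt
  · rw [cast_two_pow_sub _ _ hr]
    have h : ((2^w : Nat) : Int) = (2:Int)^w := by push_cast; ring
    omega
  · rw [cast_two_pow_sub _ _ hr]; omega

theorem ediv_neg_two_pow (m w : Nat) :
    ((-(m:Int) - 1) / (2:Int)^w) = -((m / 2^w : Nat) : Int) - 1 := by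
  have hr : m % 2^w < 2^w := Nat.mod_lt _ (Nat.two_pow_pos w)
  have hW : ((2^w : Nat) : Int) = (2:Int)^w := by push_cast; ring
  have hm : (m : Int) = (2:Int)^w * (m / 2^w : Nat) + (m % 2^w : Nat) := by
    conv_lhs => rw [← Nat.div_add_mod m (2^w)]
    push_cast; ring
  have key : -(m:Int) - 1
      = ((2^w - 1 - m % 2^w : Nat) : Int) + (2:Int)^w * (-((m / 2^w : Nat) : Int) - 1) := by
    rw [cast_two_pow_sub _ _ hr, hm]; ring
  have hnn : (0:Int) ≤ ((2^w - 1 - m % 2^w : Nat) : Int) := Int.natCast_nonneg _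
  have hlt : ((2^w - 1 - m % 2^w : Nat) : Int) < (2:Int)^w := by
    rw [cast_two_pow_sub _ _ hr]; omega
  rw [key, Int.add_mul_ediv_left _ _ (by positivity), Int.ediv_eq_zero_of_lt hnn hlt]
  ring

theorem emod_natCast_two_pow (n w : Nat) :
    ((n:Int) % (2:Int)^w) = ((n % 2^w : Nat) : Int) := by
  have hW : ((2^w : Nat) : Int) = (2:Int)^w := by push_cast; ring
  rw [← hW]; exact_mod_cast rfl

theorem ediv_natCast_two_pow (n w : Nat) :
    ((n:Int) / (2:Int)^w) = ((n / 2^w : Nat) : Int) := by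
  have hW : ((2^w : Nat) : Int) = (2:Int)^w := by push_cast; ring
  rw [← hW]; exact_mod_cast rfl

theorem bxor_small (a : Int) (v w : Nat) (hv : v < 2^w) :
    PySem.Int.bxor a ((v : Nat) : Int)
      = (a / (2:Int)^w) * 2^w + (((a % (2:Int)^w).toNat ^^^ v : Nat) : Int) := by
  have hv0 : (0:Int) ≤ (v:Int) := Int.natCast_nonneg v
  by_cases ha : (0:Int) ≤ a
  · rw [PySem.Int.bxor, if_pos ha, if_pos hv0]
    simp only [Int.toNat_natCast]
    have ha' : a = ((a.toNat : Nat) : Int) := by omega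
    have e1 : a / (2:Int)^w = ((a.toNat / 2^w : Nat) : Int) := by
      rw [ha']; exact ediv_natCast_two_pow _ w
    have e2 : (a % (2:Int)^w).toNat = a.toNat % 2^w := by
      rw [ha', emod_natCast_two_pow, Int.toNat_natCast, Int.toNat_natCast]
    rw [e1, e2, nat_xor_split a.toNat v w hv]
    push_cast; ring
  · rw [PySem.Int.bxor, if_neg ha, if_pos hv0]
    simp only [Int.toNat_natCast]
    set m := (-a-1).toNat with hmdef
    have ha' : a = -((m : Nat) : Int) - 1 := by omega
    have hr : m % 2^w < 2^w := Nat.mod_lt _ (Nat.two_pow_pos w)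
    have hxlt : (m % 2^w) ^^^ v < 2^w := Nat.xor_lt_two_pow hr hv
    have e1 : a / (2:Int)^w = -((m / 2^w : Nat) : Int) - 1 := by
      rw [ha']; exact ediv_neg_two_pow m w
    have e2 : (a % (2:Int)^w).toNat = 2^w - 1 - m % 2^w := by
      rw [ha', emod_neg_two_pow, Int.toNat_natCast]
    have hx : (2^w - 1 - m % 2^w) ^^^ v = 2^w - 1 - ((m % 2^w) ^^^ v) := by
      rw [← nat_xor_ones w (m % 2^w) hr, Nat.xor_assoc, nat_xor_ones w _ hxlt]
    rw [e1, e2, hx, nat_xor_split m v w hv, cast_two_pow_sub _ _ hxlt]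
    push_cast; ring
theorem int_mask_toNat (w : Nat) : ((2:Int)^w - 1).toNat = 2^w - 1 := by
  have h : ((2^w : Nat) : Int) = (2:Int)^w := by push_cast; ring
  omega

theorem band_mask (a : Int) (w : Nat) :
    PySem.Int.band a ((2:Int)^w - 1) = (((a % (2:Int)^w).toNat : Nat) : Int) := by
  have h1 : (1:Int) ≤ 2^w := one_le_pow₀ (by norm_num)
  have hW : ((2^w : Nat) : Int) = (2:Int)^w := by push_cast; ring
  by_cases ha : (0:Int) ≤ a
  · rw [PySem.Int.band, if_pos ha, if_pos (by omega)]
    rw [int_mask_toNat, Nat.and_two_pow_sub_one_eq_mod]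
    have ha' : a = ((a.toNat : Nat) : Int) := by omega
    have h2 : a % (2:Int)^w = ((a.toNat % 2^w : Nat) : Int) := by
      rw [ha', ← hW]; exact_mod_cast rfl
    rw [h2]
    omega
  · rw [PySem.Int.band, if_neg ha, if_pos (by omega)]
    have ha' : a = -(((-a-1).toNat : Nat) : Int) - 1 := by omega
    set m := (-a-1).toNat with hm
    rw [ha', emod_neg_two_pow m w, int_mask_toNat, Nat.and_comm, Nat.and_two_pow_sub_one_eq_mod]
    have hr : m % 2^w < 2^w := Nat.mod_lt _ (Nat.two_pow_pos w)
    omega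

theorem decomp_int (a : Int) (w : Nat) :
    a = (a / (2:Int)^w) * 2^w + (((a % (2:Int)^w).toNat : Nat) : Int) := by
  have h := Int.mul_ediv_add_emod a ((2:Int)^w)
  have hnn : (0:Int) ≤ a % (2:Int)^w := Int.emod_nonneg a (by positivity)
  rw [Int.toNat_of_nonneg hnn]
  linarith

theorem toNat_emod_lt (a : Int) (w : Nat) : (a % (2:Int)^w).toNat < 2^w := by
  have h := Int.emod_lt_of_pos a (b := (2:Int)^w) (by positivity)
  have hW : ((2^w : Nat) : Int) = (2:Int)^w := by push_cast; ring
  omega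

theorem band_shift_one (a : Int) (w j : Nat) (hj : j < w) :
    PySem.Int.band (a >>> j) 1
      = (if ((a % (2:Int)^w).toNat).testBit j then (1:Int) else 0) := by
  rw [PySem.Int.band_one, PySem.Int.mod_eq_emod_of_pos (by norm_num)]
  have hsr : a >>> j = a / (2:Int)^j := by
    rw [Int.shiftRight_eq_div_pow]; norm_num
  set L : Nat := (a % (2:Int)^w).toNat with hL
  have hpow : (2:Int)^j * (2^(w-j-1) * 2) = 2^w := by
    rw [← pow_succ, ← pow_add]
    congr 1
    omega
  have hsplit : a = (L : Int) + (2:Int)^j * ((a / 2^w) * (2^(w-j-1) * 2)) := by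
    calc a = (a / (2:Int)^w) * 2^w + (L : Int) := decomp_int a w
    _ = (L : Int) + (a / 2^w) * ((2:Int)^j * (2^(w-j-1) * 2)) := by rw [hpow]; ring
    _ = (L : Int) + (2:Int)^j * ((a / 2^w) * (2^(w-j-1) * 2)) := by ring
  have hdiv : a / (2:Int)^j = ((L / 2^j : Nat) : Int) + (a / 2^w) * (2^(w-j-1) * 2) := by
    conv_lhs => rw [hsplit]
    rw [Int.add_mul_ediv_left _ _ (by positivity), ediv_natCast_two_pow]
  rw [hsr, hdiv]
  have hmod : (((L / 2^j : Nat) : Int) + a / 2^w * (2^(w-j-1) * 2)) % 2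
      = ((L / 2^j % 2 : Nat) : Int) := by
    rw [show ((L / 2^j : Nat) : Int) + a / 2^w * (2^(w-j-1) * 2)
        = ((L / 2^j : Nat) : Int) + 2 * (a / 2^w * 2^(w-j-1)) by ring,
      Int.add_mul_emod_self_left]
    exact_mod_cast rfl
  rw [hmod, Nat.testBit_eq_decide_div_mod_eq]
  have h01 : L / 2^j % 2 = 0 ∨ L / 2^j % 2 = 1 := by omega
  rcases h01 with h0 | h1
  · simp [h0]
  · simp [h1]

theorem mask_eq (l : Nat) : (2:Int) <<< l - 1 = (2:Int)^(l+1) - 1 := by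
  rw [Int.shiftLeft_eq, pow_succ]
  ring

theorem inv4Loop_eq (l : Nat) : ∀ (fuel i : Nat) (H : Int) (x : Nat), x < 2^(l+1) →
    inv4Loop fuel l ((2:Int) <<< l - 1) i (H * 2^(l+1) + (x : Nat)) 
      = H * 2^(l+1) + ((natLoop fuel l i x : Nat) : Int) := by
  intro fuel
  induction fuel with
  | zero => intro i H x hx; rfl
  | succ fuel ih =>
    intro i H x hx
    rw [inv4Loop, natLoop]
    by_cases hi : i ≤ l
    · rw [if_pos hi, if_pos hi]
      set w := l + 1 with hw
      have hxlt : ((x : Nat) : Int) < (2:Int)^w := by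
        have : ((2^w : Nat) : Int) = (2:Int)^w := by push_cast; ring
        omega
      have hx0 : (0:Int) ≤ ((x:Nat):Int) := Int.natCast_nonneg x
      -- the masked shifted term
      have hb : PySem.Int.band ((H * 2^w + (x:Nat)) <<< i) ((2:Int) <<< l - 1)
          = (((x <<< i) % 2^w : Nat) : Int) := by
        rw [mask_eq, band_mask, Int.shiftLeft_eq]
        have h1 : (H * (2:Int)^w + (x:Nat)) * 2^i = ((x * 2^i : Nat) : Int) + (2:Int)^w * (H * 2^i) := by
          push_cast; ring
        rw [h1, Int.add_mul_emod_self_left, emod_natCast_two_pow, Int.toNat_natCast,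
          Nat.shiftLeft_eq]
      rw [hb]
      have hmlt : (x <<< i) % 2^w < 2^w := Nat.mod_lt _ (Nat.two_pow_pos w)
      rw [bxor_small _ _ w hmlt]
      have hdiv : (H * (2:Int)^w + (x:Nat)) / 2^w = H := by
        rw [show H * (2:Int)^w + (x:Nat) = ((x:Nat):Int) + (2:Int)^w * H by ring,
          Int.add_mul_ediv_left _ _ (by positivity), Int.ediv_eq_zero_of_lt hx0 hxlt]
        ring
      have hmm : ((H * (2:Int)^w + (x:Nat)) % 2^w).toNat = x := by
        rw [show H * (2:Int)^w + (x:Nat) = ((x:Nat):Int) + (2:Int)^w * H by ring,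
          Int.add_mul_emod_self_left, Int.emod_eq_of_lt hx0 hxlt, Int.toNat_natCast]
      rw [hdiv, hmm]
      exact ih (i <<< 1) H _ (Nat.xor_lt_two_pow hx hmlt)
    · rw [if_neg hi, if_neg hi]

theorem natLoop_lt (l : Nat) : ∀ (fuel i x : Nat), x < 2^(l+1) → natLoop fuel l i x < 2^(l+1) := by
  intro fuel
  induction fuel with
  | zero => intro i x hx; exact hx
  | succ fuel ih =>
    intro i x hx
    rw [natLoop]
    by_cases hi : i ≤ l
    · rw [if_pos hi]
      exact ih _ _ (Nat.xor_lt_two_pow hx (Nat.mod_lt _ (Nat.two_pow_pos _)))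
    · rw [if_neg hi]; exact hx

theorem natLoop_spec (l : Nat) : ∀ (fuel i x x₀ : Nat), 1 ≤ i → l + 2 ≤ fuel + i →
    x < 2^(l+1) →
    (∀ j, j ≤ l → x.testBit j
        = Bool.xor (pref x₀ j) (if i ≤ j then pref x₀ (j - i) else false)) →
    (∀ j, j ≤ l → (natLoop fuel l i x).testBit j = pref x₀ j) := by
  intro fuel
  induction fuel with
  | zero =>
    intro i x x₀ hi hfi hx hinv j hj
    rw [natLoop]
    rw [hinv j hj, if_neg (by omega)]
    simp
  | succ fuel ih =>
    intro i x x₀ hi hfi hx hinv j hj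
    rw [natLoop]
    by_cases hil : i ≤ l
    · rw [if_pos hil]
      apply ih (i <<< 1) _ x₀ (by rw [Nat.shiftLeft_eq]; omega)
          (by rw [Nat.shiftLeft_eq]; omega)
          (Nat.xor_lt_two_pow hx (Nat.mod_lt _ (Nat.two_pow_pos _)))
          _ j hj
      intro k hk
      rw [Nat.testBit_xor, Nat.testBit_mod_two_pow, Nat.testBit_shiftLeft, Nat.shiftLeft_eq]
      have hkl : k < l + 1 := by omega
      rw [hinv k hk]
      by_cases h1 : i ≤ k
      · have hki : k - i ≤ l := by omega
        rw [hinv (k - i) hki]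
        by_cases h2 : i * 2 ≤ k
        · have e1 : i ≤ k - i := by omega
          have e2 : k - i - i = k - i * 2 := by omega
          simp only [hkl, decide_true, Bool.true_and, ge_iff_le, h1, if_pos e1, e2,
            if_pos h2, decide_true]
          cases pref x₀ k <;> cases pref x₀ (k - i) <;> cases pref x₀ (k - i * 2) <;> rfl
        · have e1 : ¬ (i ≤ k - i) := by omega
          simp only [hkl, decide_true, Bool.true_and, ge_iff_le, h1, if_neg e1,
            if_neg h2, decide_true]
          cases pref x₀ k <;> cases pref x₀ (k - i) <;> rfl
      · have h2 : ¬ (i * 2 ≤ k) := by omega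
        simp only [hkl, decide_true, Bool.true_and, ge_iff_le, h1, if_neg h2, decide_false]
        cases pref x₀ k <;> rfl
    · rw [if_neg hil]
      rw [hinv j hj, if_neg (by omega)]
      simp

theorem pref_xor (a b : Nat) : ∀ j, pref (a ^^^ b) j = Bool.xor (pref a j) (pref b j) := by
  intro j
  induction j with
  | zero => simp only [pref]; rw [Nat.testBit_xor]
  | succ j ih =>
    rw [pref, pref, pref, ih, Nat.testBit_xor]
    cases pref a j <;> cases pref b j <;> cases a.testBit (j+1) <;> cases b.testBit (j+1) <;> rfl

theorem pref_small (t : Nat) (ht : t ≤ 1) : ∀ j, pref t j = decide (t = 1) := by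
  intro j
  induction j with
  | zero =>
    rw [pref, Nat.testBit_eq_decide_div_mod_eq]
    simp only [pow_zero, Nat.div_one]
    rcases Nat.le_one_iff_eq_zero_or_eq_one.mp ht with h | h <;> simp [h]
  | succ j ih =>
    rw [pref, ih, Nat.testBit_lt_two_pow (lt_of_le_of_lt ht (by
      have : (2:Nat)^1 ≤ 2^(j+1) := Nat.pow_le_pow_right (by norm_num) (by omega)
      omega))]
    simp

theorem testBit_eq_pref_init (x₀ j : Nat) :
    x₀.testBit j = Bool.xor (pref x₀ j) (if 1 ≤ j then pref x₀ (j - 1) else false) := by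
  cases j with
  | zero => simp [pref]
  | succ j =>
    rw [if_pos (by omega), Nat.add_sub_cancel, pref]
    cases pref x₀ j <;> cases x₀.testBit (j+1) <;> rfl

theorem bxor_bool (p q : Bool) :
    PySem.Int.bxor (if p then 1 else 0) (if q then 1 else 0) = if Bool.xor p q then 1 else 0 := by
  cases p <;> cases q <;> decide

theorem shiftLeft_bool (c : Bool) (n : Nat) :
    (if c then (1:Int) else 0) <<< n = if c then ((2^n : Nat) : Int) else 0 := by
  cases c <;> simp [Int.shiftLeft_eq]

theorem foldB (bas1 : Int) (w : Nat) (tb : Bool) :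
    ∀ n, n ≤ w →
    ∃ Ln : Nat, Ln < 2^n ∧
      (∀ d, d < n → Ln.testBit d
          = Bool.xor (pref ((bas1 % (2:Int)^w).toNat) d) tb) ∧
      (List.range n).foldl (inv4AltStep bas1 (if tb then 1 else 0)) (0, 0)
        = ((if n = 0 then (0:Int) else if pref ((bas1 % (2:Int)^w).toNat) (n-1) then 1 else 0),
           ((Ln : Nat) : Int)) := by
  set L : Nat := (bas1 % (2:Int)^w).toNat with hL
  intro n
  induction n with
  | zero =>
    intro _
    exact ⟨0, by norm_num, by omega, by simp⟩
  | succ n ih =>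
    intro hn
    obtain ⟨Ln, hlt, hbits, heq⟩ := ih (by omega)
    have hnw : n < w := by omega
    set c : Bool := Bool.xor (pref L n) tb with hc
    refine ⟨Ln + (if c then 2^n else 0), ?_, ?_, ?_⟩
    · have : (2:Nat)^(n+1) = 2^n * 2 := by rw [Nat.pow_succ]
      by_cases h : c = true <;> simp [h] <;> omega
    · intro d hd
      have hrepr : Ln + (if c then 2^n else 0) = 2^n * (if c then 1 else 0) + Ln := by
        by_cases h : c = true
        · simp [h]
          omega
        · simp [h]
      rw [hrepr, Nat.testBit_two_pow_mul_add _ hlt]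
      by_cases hdn : d < n
      · rw [if_pos hdn]; exact hbits d hdn
      · have hdn' : d = n := by omega
        rw [if_neg hdn, hdn', Nat.sub_self]
        have hb : (if c then (1:Nat) else 0).testBit 0 = c := by cases c <;> simp
        rw [hb, hc]
    · rw [List.range_succ, List.foldl_append, heq]
      simp only [List.foldl_cons, List.foldl_nil]
      rw [inv4AltStep]
      have hfst : (if n = 0 then (0:Int) else if pref L (n-1) then 1 else 0)
          = if (if n = 0 then false else pref L (n-1)) then (1:Int) else 0 := by
        by_cases h : n = 0 <;> simp [h]
      have hpf : PySem.Int.bxor (if n = 0 then (0:Int) else if pref L (n-1) then 1 else 0)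
            (PySem.Int.band (bas1 >>> n) 1) = if pref L n then 1 else 0 := by
        rw [hfst, band_shift_one bas1 w n hnw, ← hL, bxor_bool]
        congr 1
        cases n with
        | zero => simp [pref]
        | succ m => rw [pref]; simp
      simp only [hpf]
      rw [Prod.mk.injEq]
      refine ⟨?_, ?_⟩
      · simp
      · rw [bxor_bool, ← hc, shiftLeft_bool]
        cases c <;> simp

-- full equality of the two ports (on every input)
theorem inv4_eq_alt (bas1 bas2 : Int) : inv4 bas1 bas2 = inv4_alt bas1 bas2 := by
  rw [inv4, inv4_alt]
  set l := min (PySem.Int.bitLength bas1) (PySem.Int.bitLength bas2) with hl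
  set tN : Nat := PySem.Int.bitCount bas1 % 2 with htN
  set tb : Bool := decide (tN = 1) with htb
  set L : Nat := (bas1 % (2:Int)^(l+1)).toNat with hLdef
  have ht : PySem.Int.band ((PySem.Int.bitCount bas1 : Nat) : Int) 1 = ((tN : Nat) : Int) := by
    rw [show (1:Int) = ((1:Nat) : Int) from rfl, PySem.Int.band_natCast, Nat.and_one_is_mod]
  have htN1 : tN ≤ 1 := by omega
  have htif : ((tN : Nat) : Int) = if tb then 1 else 0 := by
    rw [htb]
    rcases Nat.le_one_iff_eq_zero_or_eq_one.mp htN1 with h | h <;> simp [h]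
  have hw1 : (2:Nat)^1 ≤ 2^(l+1) := Nat.pow_le_pow_right (by norm_num) (by omega)
  have htlt : tN < 2^(l+1) := by omega
  have hLlt : L < 2^(l+1) := toNat_emod_lt bas1 (l+1)
  have hx0lt : L ^^^ tN < 2^(l+1) := Nat.xor_lt_two_pow hLlt htlt
  have hacc : PySem.Int.bxor bas1 ((tN : Nat) : Int)
      = (bas1 / (2:Int)^(l+1)) * 2^(l+1) + ((L ^^^ tN : Nat) : Int) := bxor_small bas1 tN (l+1) htlt
  have hloop := inv4Loop_eq l (l+1) 1 (bas1 / (2:Int)^(l+1)) (L ^^^ tN) hx0lt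
  set XA : Nat := natLoop (l+1) l 1 (L ^^^ tN) with hXA
  have hXAlt : XA < 2^(l+1) := natLoop_lt l (l+1) 1 _ hx0lt
  have hXAbits : ∀ j, j ≤ l → XA.testBit j = Bool.xor (pref L j) tb := by
    intro j hj
    rw [hXA, natLoop_spec l (l+1) 1 (L ^^^ tN) (L ^^^ tN) (by omega) (by omega) hx0lt
        (fun k _ => testBit_eq_pref_init (L ^^^ tN) k) j hj]
    rw [pref_xor, pref_small tN htN1]
  obtain ⟨Lw, hLwlt, hLwbits, hfold⟩ := foldB bas1 (l+1) tb (l+1) (le_refl (l+1))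
  have hXAeq : XA = Lw := by
    apply Nat.eq_of_testBit_eq
    intro d
    by_cases hd : d ≤ l
    · rw [hXAbits d hd, hLwbits d (by omega)]
    · have h2 : (2:Nat)^(l+1) ≤ 2^d := Nat.pow_le_pow_right (by norm_num) (by omega)
      rw [Nat.testBit_lt_two_pow (by omega), Nat.testBit_lt_two_pow (by omega)]
  have hshr : (bas1 >>> (l+1)) <<< (l+1) = (bas1 / (2:Int)^(l+1)) * 2^(l+1) := by
    rw [Int.shiftRight_eq_div_pow, Int.shiftLeft_eq]
    norm_num
  rw [← htif] at hfold
  have hbig : inv4Loop (l+1) l ((2:Int) <<< l - 1) 1 (PySem.Int.bxor bas1 ((tN : Nat) : Int))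
      = ((bas1 >>> (l+1)) <<< (l+1)) + ((Lw : Nat) : Int) := by
    rw [hacc, hloop, hshr, hXAeq]
  rw [ht, hbig, hfold]

-- ===== VERDICT (by name: the statement is the Claim_ definition above) =====
theorem inv4_spec : Claim_equal_inv4 := by
  intro bas1 bas2 _
  unfold Spec_inv4
  exact inv4_eq_alt bas1 bas2
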